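-- pv_equiv track=rewrite | github.com/reimunyancat/baekjoon | python/31264.py | find_min_skill
-- ===== SOURCE A (Python) =====
-- def can_promote(skill, targets, m, a):
--     score = 0
--     for _ in range(m):
--         for target in targets:
--             if skill >= target:
--                 score += target
--                 skill += target
--                 break
--         if score >= a:
--             return True
--     return False
--
-- def find_min_skill(n, m, a, targets):
--     targets.sort(reverse=True)
--     low, high = 0, 10**10
--
--     while low <= high:
--         mid = (low + high) // 2
--
--         if can_promote(mid, targets, m, a):
--             high = mid - 1
--         else:
--             low = mid + 1
--
--     return low
-- ===== SOURCE B (Python) =====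
-- def _can_fast(skill, targets, m, a):
--     # collapse runs of rounds that pick the same target into one arithmetic jump
--     remaining = m
--     score = 0
--     while remaining > 0:
--         t = None
--         u = None
--         for x in targets:
--             if skill >= x:
--                 t = x
--                 break
--             u = x
--         if t is None:
--             return score >= a
--         if t <= 0:
--             return score + t >= a
--         k_score = max(1, -((score - a) // t))
--         if u is None:
--             return k_score <= remaining
--         k_exit = -((skill - u) // t)
--         if k_score <= min(remaining, k_exit):
--             return True
--         if remaining <= k_exit:
--             return False
--         remaining -= k_exit
--         score += k_exit * t
--         skill += k_exit * t
--     return False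
--
-- def find_min_skill(n, m, a, targets):
--     targets.sort(reverse=True)
--     low, high = 0, 10**10
--     while low <= high:
--         mid = (low + high) // 2
--         if _can_fast(mid, targets, m, a):
--             high = mid - 1
--         else:
--             low = mid + 1
--     return low
-- ===== Notes on version B (the rewrite author's own statement) =====
-- stated objective: faster
-- what changed: The per-round promotion simulation (m rounds, each scanning targets) is replaced by an arithmetic phase collapse: every maximal run of rounds that picks the same target is executed in one ceiling-division step (rounds-to-reach-score and rounds-to-outgrow-the-phase), and non-positive or absent picks are resolved in closed form, so each binary-search probe costs O(n^2) instead of O(m*n).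
import Mathlib
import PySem

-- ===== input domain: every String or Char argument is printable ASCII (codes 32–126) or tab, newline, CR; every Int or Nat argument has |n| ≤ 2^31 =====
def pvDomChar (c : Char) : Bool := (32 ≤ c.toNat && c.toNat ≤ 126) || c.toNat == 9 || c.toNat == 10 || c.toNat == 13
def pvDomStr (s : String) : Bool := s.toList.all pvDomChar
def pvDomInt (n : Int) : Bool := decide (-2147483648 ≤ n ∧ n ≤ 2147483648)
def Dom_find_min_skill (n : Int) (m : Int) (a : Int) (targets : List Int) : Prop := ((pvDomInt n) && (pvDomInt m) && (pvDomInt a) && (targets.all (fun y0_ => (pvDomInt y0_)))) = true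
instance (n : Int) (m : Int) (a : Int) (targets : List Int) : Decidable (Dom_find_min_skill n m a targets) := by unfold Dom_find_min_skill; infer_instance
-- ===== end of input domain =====

-- B replaces A's per-round promotion simulation by arithmetic collapse of the runs of rounds
-- that pick the same target, so each feasibility test costs O(n^2) instead of O(m*n) rounds
-- (objective: faster in m). Both versions sort `targets` in place (same side effect);
-- the equivalence proved here is about the return value.

-- ===== PORT A =====
-- inner `for target in targets: if skill >= target: … break`: first target with skill ≥ target
def scanT (skill : Int) : List Int → Option Int
  | [] => none
  | t :: ts => if skill ≥ t then some t else scanT skill ts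

-- `for _ in range(m)` loop of can_promote, state (score, skill), early return True
def canA_loop (a : Int) (targets : List Int) : List Int → Int → Int → Bool
  | [], _, _ => false
  | _ :: rest, score, skill =>
    match scanT skill targets with
    | some t =>
        if score + t ≥ a then true else canA_loop a targets rest (score + t) (skill + t)
    | none => if score ≥ a then true else canA_loop a targets rest score skill

def can_promote (skill : Int) (targets : List Int) (m : Int) (a : Int) : Bool :=
  canA_loop a targets (PySem.List.pyRange 0 m 1) 0 skill

def bsearchA (targets : List Int) (m a : Int) (low high : Int) : Int :=
  if h : low ≤ high then
    let mid := PySem.Int.floordiv (low + high) 2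
    if can_promote mid targets m a then bsearchA targets m a low (mid - 1)
    else bsearchA targets m a (mid + 1) high
  else low
termination_by (high + 1 - low).toNat
decreasing_by
  · have hb := PySem.Int.floordiv_two_mid_bounds h; omega
  · have hb := PySem.Int.floordiv_two_mid_bounds h; omega

def find_min_skill (n : Int) (m : Int) (a : Int) (targets : List Int) : Int :=
  bsearchA (PySem.List.sorted targets (fun x => x) true) m a 0 (10 ^ 10)

-- ===== PORT B =====
-- B's selection scan: first target t with skill ≥ t, plus u = the last target skipped before t
def scanTU (skill : Int) : Option Int → List Int → Option Int × Option Int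
  | u, [] => (none, u)
  | u, x :: xs => if skill ≥ x then (some x, u) else scanTU skill (some x) xs

-- termination fact for canB_loop: the reported u was skipped, so skill < u
theorem scanTU_u_lt_aux (skill : Int) : ∀ (ts : List Int) (acc : Option Int) (r : Option Int) (u : Int),
    scanTU skill acc ts = (r, some u) → some u = acc ∨ skill < u := by
  intro ts
  induction ts with
  | nil => intro acc r u h; simp [scanTU] at h; exact Or.inl (by rw [h.2])
  | cons x xs ih =>
    intro acc r u h
    simp only [scanTU] at h
    by_cases hx : skill ≥ x
    · simp [hx] at h; exact Or.inl (by rw [h.2])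
    · simp [hx] at h
      rcases ih (some x) r u h with h1 | h1
      · exact Or.inr (by simp at h1; omega)
      · exact Or.inr h1

theorem scanTU_u_lt (skill : Int) (ts : List Int) (r : Option Int) (u : Int)
    (h : scanTU skill none ts = (r, some u)) : skill < u := by
  rcases scanTU_u_lt_aux skill ts none r u h with h1 | h1
  · simp at h1
  · exact h1

-- the `while remaining > 0` loop of B's _can_fast
def canB_loop (a : Int) (targets : List Int) (remaining score skill : Int) : Bool :=
  if hr : 0 < remaining then
    match hscan : scanTU skill none targets with
    | (none, _) => decide (score ≥ a)
    | (some t, none) =>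
        if t ≤ 0 then decide (score + t ≥ a)
        else decide (max 1 (-(PySem.Int.floordiv (score - a) t)) ≤ remaining)
    | (some t, some u) =>
        if ht : t ≤ 0 then decide (score + t ≥ a)
        else
          let k_score := max 1 (-(PySem.Int.floordiv (score - a) t))
          let k_exit := -(PySem.Int.floordiv (skill - u) t)
          if k_score ≤ min remaining k_exit then true
          else if hk : remaining ≤ k_exit then false
          else canB_loop a targets (remaining - k_exit) (score + k_exit * t) (skill + k_exit * t)
  else false
termination_by remaining.toNat
decreasing_by
  have hu : skill < u := scanTU_u_lt skill targets (some t) u hscan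
  have ht' : 0 < t := by omega
  have h1 : PySem.Int.floordiv (skill - u) t < 0 :=
    (PySem.Int.floordiv_lt_iff_lt_mul ht').mpr (by omega)
  omega

def can_fast (skill : Int) (targets : List Int) (m : Int) (a : Int) : Bool :=
  canB_loop a targets m 0 skill

def bsearchB (targets : List Int) (m a : Int) (low high : Int) : Int :=
  if h : low ≤ high then
    let mid := PySem.Int.floordiv (low + high) 2
    if can_fast mid targets m a then bsearchB targets m a low (mid - 1)
    else bsearchB targets m a (mid + 1) high
  else low
termination_by (high + 1 - low).toNat
decreasing_by
  · have hb := PySem.Int.floordiv_two_mid_bounds h; omega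
  · have hb := PySem.Int.floordiv_two_mid_bounds h; omega

def find_min_skill_alt (n : Int) (m : Int) (a : Int) (targets : List Int) : Int :=
  bsearchB (PySem.List.sorted targets (fun x => x) true) m a 0 (10 ^ 10)

-- ===== PRECONDITION & SPEC =====
def Spec_find_min_skill (n : Int) (m : Int) (a : Int) (targets : List Int) (out : Int) : Prop := out = find_min_skill_alt n m a targets
instance (n : Int) (m : Int) (a : Int) (targets : List Int) (out : Int) : Decidable (Spec_find_min_skill n m a targets out) := by unfold Spec_find_min_skill; infer_instance

-- ===== CLAIM (what is proved, stated in full; the proofs are below) =====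
def Claim_equal_find_min_skill : Prop := ∀ (n : Int) (m : Int) (a : Int) (targets : List Int), Dom_find_min_skill n m a targets → Spec_find_min_skill n m a targets (find_min_skill n m a targets)

-- ===== LEMMAS AND PROOFS =====

theorem scanTU_fst (skill : Int) : ∀ (ts : List Int) (acc : Option Int),
    (scanTU skill acc ts).1 = scanT skill ts := by
  intro ts
  induction ts with
  | nil => intro acc; simp [scanTU, scanT]
  | cons x xs ih => intro acc; by_cases hx : skill ≥ x <;> simp [scanTU, scanT, hx, ih]

theorem scanT_some_le (skill : Int) : ∀ (ts : List Int) (t : Int),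
    scanT skill ts = some t → t ≤ skill := by
  intro ts
  induction ts with
  | nil => intro t h; simp [scanT] at h
  | cons x xs ih =>
    intro t h
    by_cases hx : skill ≥ x
    · simp [scanT, hx] at h; omega
    · simp [scanT, hx] at h; exact ih t h

-- value of the scan is monotone in the skill (descending-sorted list)
theorem scanT_val_mono (ts : List Int) (hP : List.Pairwise (fun x y : Int => y ≤ x) ts) :
    ∀ (s s' t' : Int), s' ≤ s → scanT s' ts = some t' →
    ∃ t'', scanT s ts = some t'' ∧ t' ≤ t'' := by
  induction ts with
  | nil => intro s s' t' _ h; simp [scanT] at h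
  | cons x xs ih =>
    intro s s' t' hs h
    rcases List.pairwise_cons.mp hP with ⟨hx, hP'⟩
    by_cases hx' : s' ≥ x
    · simp [scanT, hx'] at h
      have : s ≥ x := by omega
      exact ⟨x, by simp [scanT, this], by omega⟩
    · simp [scanT, hx'] at h
      by_cases hsx : s ≥ x
      · refine ⟨x, by simp [scanT, hsx], ?_⟩
        have ht'le : t' ≤ s' := scanT_some_le s' xs t' h
        have hmem : t' ∈ xs := by
          clear ih hP hP' hx ht'le
          induction xs with
          | nil => simp [scanT] at h
          | cons y ys ihy =>
            by_cases hy : s' ≥ y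
            · simp [scanT, hy] at h; simp [h]
            · simp [scanT, hy] at h; simp [ihy h]
        exact hx t' hmem
      · simp [scanT, hsx]
        exact ih hP' s s' t' hs h

theorem scanTU_snd_some (skill : Int) : ∀ (ts : List Int) (v : Int),
    ∃ u, (scanTU skill (some v) ts).2 = some u ∧ (u = v ∨ u ∈ ts) := by
  intro ts
  induction ts with
  | nil => intro v; exact ⟨v, by simp [scanTU], Or.inl rfl⟩
  | cons x xs ih =>
    intro v
    by_cases hx : skill ≥ x
    · exact ⟨v, by simp [scanTU, hx], Or.inl rfl⟩
    · rcases ih x with ⟨u, hu, hc⟩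
      refine ⟨u, by simpa [scanTU, hx] using hu, ?_⟩
      rcases hc with h | h
      · exact Or.inr (by simp [h])
      · exact Or.inr (by simp [h])

-- stability: the scan result (t, u) is unchanged for any skill s' with t ≤ s' (< u)
theorem scanTU_stable (skill s' : Int) : ∀ (ts : List Int) (acc : Option Int) (t : Int) (uo : Option Int),
    List.Pairwise (fun x y : Int => y ≤ x) ts →
    scanTU skill acc ts = (some t, uo) → t ≤ s' → (∀ u, uo = some u → s' < u) →
    scanTU s' acc ts = (some t, uo) := by
  intro ts
  induction ts with
  | nil => intro acc t uo _ h; simp [scanTU] at h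
  | cons x xs ih =>
    intro acc t uo hP h h1 h2
    rcases List.pairwise_cons.mp hP with ⟨hx, hP'⟩
    by_cases hxx : skill ≥ x
    · simp [scanTU, hxx] at h
      obtain ⟨rfl, rfl⟩ := h
      simp [scanTU, show s' ≥ x from by omega]
    · simp only [scanTU, if_neg hxx] at h
      -- the accumulator is now some x; its final u is ≤ x, and s' < u, so s' < x
      rcases scanTU_snd_some skill xs x with ⟨u, hu, hc⟩
      have huo : uo = some u := by rw [h] at hu; exact hu
      have hux : u ≤ x := by
        rcases hc with h' | hmem
        · omega
        · exact hx u hmem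
      have hs'x : ¬ (s' ≥ x) := by have := h2 u huo; omega
      simp only [scanTU, if_neg hs'x]
      exact ih (some x) t uo hP' h h1 h2

theorem scanT_stable (skill s' : Int) (ts : List Int) (t : Int) (uo : Option Int)
    (hP : List.Pairwise (fun x y : Int => y ≤ x) ts)
    (h : scanTU skill none ts = (some t, uo)) (h1 : t ≤ s') (h2 : ∀ u, uo = some u → s' < u) :
    scanT s' ts = some t := by
  have := scanTU_stable skill s' ts none t uo hP h h1 h2
  have hfst := scanTU_fst s' ts none
  rw [this] at hfst
  exact hfst.symm

-- A's loop when no target is ever picked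
theorem A_none (a : Int) (ts : List Int) (skill : Int) (h : scanT skill ts = none) :
    ∀ (rounds : List Int) (score : Int), rounds ≠ [] →
    canA_loop a ts rounds score skill = decide (score ≥ a) := by
  intro rounds
  induction rounds with
  | nil => intro score hne; exact absurd rfl hne
  | cons r rs ih =>
    intro score _
    simp only [canA_loop, h]
    by_cases hsc : score ≥ a
    · simp [hsc]
    · cases rs with
      | nil => simp [hsc, canA_loop]
      | cons r' rs' => simp [hsc]; rw [ih score (by simp)]; simp [hsc]

-- A's loop can never reach a when the score is below a and all future picks are ≤ 0
theorem A_dead (a : Int) (ts : List Int) (hP : List.Pairwise (fun x y : Int => y ≤ x) ts) :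
    ∀ (rounds : List Int) (score skill : Int), score < a →
    (scanT skill ts = none ∨ ∃ t, scanT skill ts = some t ∧ t ≤ 0) →
    canA_loop a ts rounds score skill = false := by
  intro rounds
  induction rounds with
  | nil => intro score skill _ _; rfl
  | cons r rs ih =>
    intro score skill hsc hcase
    rcases hcase with hnone | ⟨t, hsome, ht⟩
    · simp only [canA_loop, hnone]
      rw [if_neg (by omega)]
      exact ih score skill hsc (Or.inl hnone)
    · simp only [canA_loop, hsome]
      rw [if_neg (by omega)]
      -- next state: score+t < a still, and the next pick (if any) is ≤ t ≤ 0
      apply ih (score + t) (skill + t) (by omega)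
      cases hnext : scanT (skill + t) ts with
      | none => exact Or.inl rfl
      | some t' =>
        refine Or.inr ⟨t', rfl, ?_⟩
        rcases scanT_val_mono ts hP skill (skill + t) t' (by omega) hnext with ⟨t'', h2, h3⟩
        rw [hsome] at h2
        injection h2 with h2
        omega

-- A's loop when the current pick is ≤ 0: decided by the first round
theorem A_nonpos (a : Int) (ts : List Int) (hP : List.Pairwise (fun x y : Int => y ≤ x) ts)
    (skill t : Int) (h : scanT skill ts = some t) (ht : t ≤ 0) :
    ∀ (rounds : List Int) (score : Int), rounds ≠ [] →
    canA_loop a ts rounds score skill = decide (score + t ≥ a) := by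
  intro rounds score hne
  cases rounds with
  | nil => exact absurd rfl hne
  | cons r rs =>
    simp only [canA_loop, h]
    by_cases hsc : score + t ≥ a
    · simp [hsc]
    · rw [if_neg (by omega)]
      rw [A_dead a ts hP rs (score + t) (skill + t) (by omega) ?_]
      · simp [hsc]
      · cases hnext : scanT (skill + t) ts with
        | none => exact Or.inl rfl
        | some t' =>
          refine Or.inr ⟨t', rfl, ?_⟩
          rcases scanT_val_mono ts hP skill (skill + t) t' (by omega) hnext with ⟨t'', h2, h3⟩
          rw [h] at h2
          injection h2 with h2
          omega

-- A's loop across a phase of k rounds that all pick the same positive target t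
theorem A_runseg (a : Int) (ts : List Int) (t : Int) (ht : 0 < t) :
    ∀ (k : Nat) (rounds : List Int) (score skill : Int), k ≤ rounds.length →
    (∀ j : Nat, j < k → scanT (skill + j * t) ts = some t) →
    canA_loop a ts rounds score skill =
      if 1 ≤ (k : Int) ∧ a ≤ score + k * t then true
      else canA_loop a ts (rounds.drop k) (score + k * t) (skill + k * t) := by
  intro k
  induction k with
  | zero => intro rounds score skill _ _; simp
  | succ k ihk =>
    intro rounds score skill hlen hstab
    cases rounds with
    | nil => simp at hlen
    | cons r rs =>
      have h0 : scanT skill ts = some t := by simpa using hstab 0 (Nat.succ_pos k)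
      have hknn : (0:Int) ≤ (k:Int) := Int.natCast_nonneg k
      have hmul : 0 ≤ (k:Int) * t := mul_nonneg hknn (le_of_lt ht)
      have hstab' : ∀ j : Nat, j < k → scanT (skill + t + (j:Int) * t) ts = some t := by
        intro j hj
        have hs := hstab (j+1) (by omega)
        rw [show skill + ((j+1 : Nat) : Int) * t = skill + t + (j:Int) * t from by push_cast; ring] at hs
        exact hs
      simp only [canA_loop, h0]
      by_cases hsc : score + t ≥ a
      · rw [if_pos hsc, if_pos ⟨by push_cast; omega, by push_cast; nlinarith⟩]
      · rw [if_neg hsc]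
        rw [ihk rs (score + t) (skill + t) (by simp at hlen ⊢; omega) hstab']
        rcases Nat.eq_zero_or_pos k with rfl | hkpos
        · simp only [Nat.cast_zero, zero_mul, add_zero, List.drop_zero, Nat.zero_add,
            Nat.cast_one, one_mul, List.drop_succ_cons]
          exact (if_neg (by omega)).symm
        · have e1 : score + t + (k:Int) * t = score + ((k+1 : Nat) : Int) * t := by push_cast; ring
          have e2 : skill + t + (k:Int) * t = skill + ((k+1 : Nat) : Int) * t := by push_cast; ring
          rw [e1, e2, List.drop_succ_cons]
          exact if_congr (and_congr_left'
            (show (1 ≤ ((k : Nat) : Int)) ↔ (1 ≤ ((k+1 : Nat) : Int)) from by push_cast; omega)) rfl rfl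

-- B's k_score arithmetic: success within k same-target rounds ⟺ k_score ≤ k
theorem kscore_iff (a score t k : Int) (ht : 0 < t) :
    (1 ≤ k ∧ a ≤ score + k * t) ↔ max 1 (-(PySem.Int.floordiv (score - a) t)) ≤ k := by
  rw [max_le_iff]
  constructor
  · rintro ⟨h1, h2⟩
    refine ⟨h1, ?_⟩
    have h3 : -k ≤ PySem.Int.floordiv (score - a) t := by
      rw [PySem.Int.le_floordiv_iff_mul_le ht]
      nlinarith
    omega
  · rintro ⟨h1, h2⟩
    refine ⟨h1, ?_⟩
    have h3 : -k ≤ PySem.Int.floordiv (score - a) t := by omega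
    rw [PySem.Int.le_floordiv_iff_mul_le ht] at h3
    nlinarith

-- B's k_exit arithmetic: rounds j < k_exit stay strictly below u
theorem kexit_bound (skill u t j : Int) (ht : 0 < t) (hu : skill < u)
    (hj : 0 ≤ j) (hjk : j < -(PySem.Int.floordiv (skill - u) t)) :
    skill + j * t < u := by
  have hb := (PySem.Int.floordiv_eq_iff_of_pos ht).mp
    (rfl : PySem.Int.floordiv (skill - u) t = PySem.Int.floordiv (skill - u) t)
  set q := PySem.Int.floordiv (skill - u) t with hq
  have hlt : skill - u < (q + 1) * t := hb.2
  have hle : q + 1 + j ≤ 0 := by omega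
  nlinarith

theorem kexit_pos (skill u t : Int) (ht : 0 < t) (hu : skill < u) :
    1 ≤ -(PySem.Int.floordiv (skill - u) t) := by
  have h1 : PySem.Int.floordiv (skill - u) t < 0 :=
    (PySem.Int.floordiv_lt_iff_lt_mul ht).mpr (by nlinarith)
  omega

-- main lemma: per-round simulation = phase-collapsed loop
theorem can_eq_aux (a : Int) (ts : List Int) (hP : List.Pairwise (fun x y : Int => y ≤ x) ts) :
    ∀ (N : Nat) (remaining : Int) (rounds : List Int) (score skill : Int),
    remaining.toNat = N → rounds.length = N →
    canA_loop a ts rounds score skill = canB_loop a ts remaining score skill := by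
  intro N
  induction N using Nat.strong_induction_on with
  | _ N ihN =>
    intro remaining rounds score skill hN hlen
    rw [canB_loop]
    by_cases hr : 0 < remaining
    · rw [dif_pos hr]
      have hne : rounds ≠ [] := by intro h; rw [h] at hlen; simp at hlen; omega
      split
      next snd heq =>
        have hsT : scanT skill ts = none := by
          have hf := scanTU_fst skill ts none; rw [heq] at hf; exact hf.symm
        exact A_none a ts skill hsT rounds score hne
      next t heq =>
        have hsT : scanT skill ts = some t := by
          have hf := scanTU_fst skill ts none; rw [heq] at hf; exact hf.symm
        by_cases ht : t ≤ 0
        · rw [if_pos ht]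
          exact A_nonpos a ts hP skill t hsT ht rounds score hne
        · rw [if_neg ht]
          have ht' : 0 < t := by omega
          have htsk : t ≤ skill := scanT_some_le skill ts t hsT
          have hstab : ∀ j : Nat, j < rounds.length → scanT (skill + (j:Int) * t) ts = some t := by
            intro j _
            apply scanT_stable skill _ ts t none hP heq
            · have : 0 ≤ (j:Int) * t := mul_nonneg (Int.natCast_nonneg j) (le_of_lt ht')
              omega
            · intro u hu; exact absurd hu (by simp)
          rw [A_runseg a ts t ht' rounds.length rounds score skill le_rfl hstab]
          rw [List.drop_length]
          rw [show ((rounds.length : Nat) : Int) = remaining from by omega]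
          have hiff := kscore_iff a score t remaining ht'
          by_cases hC : 1 ≤ remaining ∧ a ≤ score + remaining * t
          · rw [if_pos hC, (decide_eq_true_iff).mpr (hiff.mp hC)]
          · rw [if_neg hC, decide_eq_false (fun hk => hC (hiff.mpr hk))]
            rfl
      next t u heq =>
        have hsT : scanT skill ts = some t := by
          have hf := scanTU_fst skill ts none; rw [heq] at hf; exact hf.symm
        by_cases ht : t ≤ 0
        · rw [dif_pos ht]
          exact A_nonpos a ts hP skill t hsT ht rounds score hne
        · rw [dif_neg ht]
          have ht' : 0 < t := by omega
          have htsk : t ≤ skill := scanT_some_le skill ts t hsT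
          have hu : skill < u := scanTU_u_lt skill ts (some t) u heq
          have hke1 : 1 ≤ -(PySem.Int.floordiv (skill - u) t) := kexit_pos skill u t ht' hu
          set ke := -(PySem.Int.floordiv (skill - u) t) with hke
          set K := min remaining ke with hK
          have hK1 : 1 ≤ K := by omega
          have hKle : K ≤ remaining := by omega
          have hcast : ((K.toNat : Nat) : Int) = K := by omega
          have hkN : K.toNat ≤ rounds.length := by omega
          have hstab : ∀ j : Nat, j < K.toNat → scanT (skill + (j:Int) * t) ts = some t := by
            intro j hj
            apply scanT_stable skill _ ts t (some u) hP heq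
            · have : 0 ≤ (j:Int) * t := mul_nonneg (Int.natCast_nonneg j) (le_of_lt ht')
              omega
            · intro u' hu'
              have huu : u = u' := Option.some.inj hu'
              rw [← huu]
              exact kexit_bound skill u t (j:Int) ht' hu (Int.natCast_nonneg j) (by omega)
          rw [A_runseg a ts t ht' K.toNat rounds score skill hkN hstab, hcast]
          have hiff := kscore_iff a score t K ht'
          by_cases hC : max 1 (-(PySem.Int.floordiv (score - a) t)) ≤ K
          · rw [if_pos (hiff.mpr hC)]
            rw [if_pos hC]
          · rw [if_neg (fun hc => hC (hiff.mp hc))]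
            rw [if_neg hC]
            by_cases hk2 : remaining ≤ ke
            · rw [dif_pos hk2]
              have hKr : K = remaining := by omega
              have : rounds.drop K.toNat = [] := by
                apply List.drop_eq_nil_of_le; omega
              rw [this]
              rfl
            · rw [dif_neg hk2]
              have hKe : K = ke := by omega
              rw [hKe]
              exact ihN (remaining - ke).toNat (by omega) (remaining - ke)
                (rounds.drop ke.toNat) (score + ke * t) (skill + ke * t) rfl
                (by simp [hlen]; omega)
    · rw [dif_neg hr]
      have : rounds = [] := by
        cases rounds with
        | nil => rfl
        | cons x xs => simp at hlen; omega
      rw [this]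
      rfl

theorem can_eq (ts : List Int) (hP : List.Pairwise (fun x y : Int => y ≤ x) ts)
    (m a skill : Int) : can_promote skill ts m a = can_fast skill ts m a := by
  unfold can_promote can_fast
  exact can_eq_aux a ts hP m.toNat m (PySem.List.pyRange 0 m 1) 0 skill rfl
    (by rw [PySem.List.length_pyRange_one]; omega)

theorem bsearch_eq (ts : List Int) (m a : Int)
    (hcan : ∀ s, can_promote s ts m a = can_fast s ts m a) :
    ∀ (N : Nat) (low high : Int), (high + 1 - low).toNat = N →
    bsearchA ts m a low high = bsearchB ts m a low high := by
  intro N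
  induction N using Nat.strong_induction_on with
  | _ N ihN =>
    intro low high hN
    rw [bsearchA, bsearchB]
    by_cases h : low ≤ high
    · rw [dif_pos h, dif_pos h]
      dsimp only
      have hb := PySem.Int.floordiv_two_mid_bounds h
      rw [hcan]
      by_cases hc : can_fast (PySem.Int.floordiv (low + high) 2) ts m a
      · rw [if_pos hc, if_pos hc]
        exact ihN (PySem.Int.floordiv (low + high) 2 - 1 + 1 - low).toNat (by omega) low _ rfl
      · rw [if_neg hc, if_neg hc]
        exact ihN (high + 1 - (PySem.Int.floordiv (low + high) 2 + 1)).toNat (by omega) _ high rfl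
    · rw [dif_neg h, dif_neg h]

-- ===== VERDICT (by name: the statement is the Claim_ definition above) =====
theorem find_min_skill_spec : Claim_equal_find_min_skill := by
  intro n m a targets _
  unfold Spec_find_min_skill find_min_skill find_min_skill_alt
  have hP : List.Pairwise (fun x y : Int => y ≤ x) (PySem.List.sorted targets (fun x => x) true) :=
    PySem.List.sorted_pairwise_rev targets (fun x => x)
  exact bsearch_eq _ m a (fun s => can_eq _ hP m a s) _ 0 (10 ^ 10) rfl
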